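-- pv_equiv track=rewrite | github.com/Coderash1998/LeetCode | 1684/1684.py | countConsistentStrings
-- ===== SOURCE A (Python) =====
-- from typing import List
--
-- def countConsistentStrings(allowed: str, words: List[str]) -> int:
--     c=0
--     for i in words:
--         for j in i:
--             if j in allowed:
--                 continue
--             else:
--                 c+=1
--                 break
--     return (len(words)-c)
-- ===== SOURCE B (Python) =====
-- def countConsistentStrings(allowed, words):
--     amask = 0
--     for c in allowed:
--         amask |= 1 << ord(c)
--     count = 0
--     for w in words:
--         m = 0
--         for ch in w:
--             m |= 1 << ord(ch)
--         if m | amask == amask: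
--             count += 1
--     return count
-- ===== Notes on version B (the rewrite author's own statement) =====
-- stated objective: alternative
-- what changed: B encodes allowed and each word as integer bitmasks keyed by character code and counts words whose mask is a bitwise subset of the allowed mask (m | amask == amask), replacing A's per-character membership scan with early break and its count-inconsistent-then-subtract arithmetic.
import Mathlib
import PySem

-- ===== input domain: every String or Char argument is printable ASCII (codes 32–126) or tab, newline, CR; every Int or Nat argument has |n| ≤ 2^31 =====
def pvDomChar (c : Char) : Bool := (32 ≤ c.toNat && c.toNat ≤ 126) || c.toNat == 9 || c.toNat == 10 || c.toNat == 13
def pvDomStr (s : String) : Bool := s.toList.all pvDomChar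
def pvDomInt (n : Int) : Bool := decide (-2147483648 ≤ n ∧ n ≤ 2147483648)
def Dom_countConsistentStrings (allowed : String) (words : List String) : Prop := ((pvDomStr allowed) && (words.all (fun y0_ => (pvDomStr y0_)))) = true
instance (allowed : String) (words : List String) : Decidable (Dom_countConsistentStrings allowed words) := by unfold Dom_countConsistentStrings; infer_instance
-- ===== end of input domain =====

-- B encodes allowed and each word as integer bitmasks and counts words whose mask is a bitwise subset of the allowed mask, instead of A's per-character membership scan with break and count-then-subtract.
-- ===== PORT A =====
-- inner 'for j in i' loop: returns true iff the loop hits 'c+=1; break'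
def aHasBad (allowed : String) : List Char → Bool
  | [] => false
  | j :: rest => if allowed.toList.contains j then aHasBad allowed rest else true

def countConsistentStrings (allowed : String) (words : List String) : Int :=
  let c := words.foldl (fun c i => if aHasBad allowed i.toList then c + 1 else c) (0 : Int)
  (words.length : Int) - c

-- ===== PORT B =====
def countConsistentStrings_alt (allowed : String) (words : List String) : Int :=
  let amask := allowed.toList.foldl (fun m c => m ||| (1 <<< c.toNat)) 0
  words.foldl (fun cnt w =>
    let m := w.toList.foldl (fun m ch => m ||| (1 <<< ch.toNat)) 0
    if m ||| amask == amask then cnt + 1 else cnt) (0 : Int)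

-- ===== PRECONDITION & SPEC =====
def Spec_countConsistentStrings (allowed : String) (words : List String) (out : Int) : Prop := out = countConsistentStrings_alt allowed words
instance (allowed : String) (words : List String) (out : Int) : Decidable (Spec_countConsistentStrings allowed words out) := by unfold Spec_countConsistentStrings; infer_instance

-- ===== CLAIM (what is proved, stated in full; the proofs are below) =====
def Claim_equal_countConsistentStrings : Prop := ∀ (allowed : String) (words : List String), Dom_countConsistentStrings allowed words → Spec_countConsistentStrings allowed words (countConsistentStrings allowed words)

-- ===== LEMMAS AND PROOFS =====

-- testBit of a mask built by folding OR of single-character bits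
lemma testBit_strMask (l : List Char) (acc : Nat) (k : Nat) :
    (l.foldl (fun m ch => m ||| (1 <<< ch.toNat)) acc).testBit k
      = (acc.testBit k || l.any (fun ch => ch.toNat == k)) := by
  induction l generalizing acc with
  | nil => simp
  | cons c rest ih =>
    simp only [List.foldl_cons, List.any_cons, ih, Nat.testBit_lor, Nat.testBit_shiftLeft]
    by_cases h : c.toNat = k
    · subst h; simp
    · have h1 : (c.toNat == k) = false := by simp [h]
      have h2 : (decide (c.toNat ≤ k) && Nat.testBit 1 (k - c.toNat)) = false := by
        by_cases hle : c.toNat ≤ k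
        · have hk : k - c.toNat ≠ 0 := by omega
          have hb : Nat.testBit 1 (k - c.toNat) = false := by
            rw [Bool.eq_false_iff]
            intro hbt
            exact hk (Nat.testBit_one_eq_true_iff_self_eq_zero.mp hbt)
          simp [hb]
        · simp [hle]
      simp [h1, h2]

-- bitwise-subset test equals "every character of w occurs in allowed"
lemma mask_subset_iff (allowed : String) (w : String) :
    ((w.toList.foldl (fun m ch => m ||| (1 <<< ch.toNat)) 0
       ||| allowed.toList.foldl (fun m c => m ||| (1 <<< c.toNat)) 0)
      == allowed.toList.foldl (fun m c => m ||| (1 <<< c.toNat)) 0)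
    = w.toList.all (fun ch => allowed.toList.contains ch) := by
  rcases h : w.toList.all (fun ch => allowed.toList.contains ch) with _ | _
  · -- some character of w is missing from allowed: masks differ at its bit
    rw [List.all_eq_false] at h
    obtain ⟨ch, hmem, hni⟩ := h
    apply beq_eq_false_iff_ne.mpr
    intro heq
    have := congrArg (fun n => Nat.testBit n ch.toNat) heq
    simp only [Nat.testBit_lor, testBit_strMask, Nat.zero_testBit, Bool.false_or] at this

    have hw : w.toList.any (fun c => c.toNat == ch.toNat) = true := by
      simp only [List.any_eq_true]; exact ⟨ch, hmem, by simp⟩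
    rw [hw] at this
    have ha : allowed.toList.any (fun c => c.toNat == ch.toNat) = true := by
      simpa using this.symm
    simp only [List.any_eq_true, beq_iff_eq] at ha
    obtain ⟨c, hc, hcn⟩ := ha
    have hcc : c = ch := by
      apply Char.ext
      apply UInt32.toNat_inj.mp
      exact hcn
    subst hcc
    exact hni (by simpa using hc)
  · -- all characters present: the OR adds nothing
    apply beq_iff_eq.mpr
    apply Nat.eq_of_testBit_eq
    intro k
    simp only [Nat.testBit_lor, testBit_strMask, Nat.zero_testBit, Bool.false_or]
    rcases hw : w.toList.any (fun c => c.toNat == k) with _ | _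
    · simp
    · simp only [List.any_eq_true, beq_iff_eq] at hw
      obtain ⟨c, hc, hck⟩ := hw
      have hall := (List.all_eq_true.mp h) c hc
      simp only [List.contains_iff_mem] at hall
      have : allowed.toList.any (fun d => d.toNat == k) = true := by
        simp only [List.any_eq_true]; exact ⟨c, hall, by simp [hck]⟩
      simp [this]

lemma aHasBad_eq_not_all (allowed : String) (l : List Char) :
    aHasBad allowed l = ! l.all (fun ch => allowed.toList.contains ch) := by
  induction l with
  | nil => simp [aHasBad]
  | cons j rest ih =>
    simp only [aHasBad, List.all_cons, Bool.not_and]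
    by_cases h : allowed.toList.contains j = true <;> simp [ih]

lemma foldl_count_if (p : String → Bool) (ws : List String) (c : Int) :
    ws.foldl (fun c i => if p i then c + 1 else c) c = c + (ws.countP p : Int) := by
  induction ws generalizing c with
  | nil => simp
  | cons w ws ih =>
    simp only [List.foldl_cons, ih, List.countP_cons]
    by_cases h : p w = true <;> simp [h] <;> ring

-- ===== VERDICT (by name: the statement is the Claim_ definition above) =====
theorem countConsistentStrings_spec : Claim_equal_countConsistentStrings := by
  intro allowed words _
  unfold Spec_countConsistentStrings countConsistentStrings countConsistentStrings_alt
  simp only []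
  rw [foldl_count_if (fun i => aHasBad allowed i.toList),
      foldl_count_if (fun w => (w.toList.foldl (fun m ch => m ||| (1 <<< ch.toNat)) 0
        ||| allowed.toList.foldl (fun m c => m ||| (1 <<< c.toNat)) 0)
        == allowed.toList.foldl (fun m c => m ||| (1 <<< c.toNat)) 0)]
  have hB : words.countP (fun w => (w.toList.foldl (fun m ch => m ||| (1 <<< ch.toNat)) 0
        ||| allowed.toList.foldl (fun m c => m ||| (1 <<< c.toNat)) 0)
        == allowed.toList.foldl (fun m c => m ||| (1 <<< c.toNat)) 0)
      = words.countP (fun w => w.toList.all (fun ch => allowed.toList.contains ch)) := by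
    apply List.countP_congr; intro w _; rw [mask_subset_iff]
  have hA : words.countP (fun i => aHasBad allowed i.toList)
      = words.countP (fun w => ! w.toList.all (fun ch => allowed.toList.contains ch)) := by
    apply List.countP_congr; intro w _; rw [aHasBad_eq_not_all]
  rw [hB, hA]
  have hsplit := List.length_eq_countP_add_countP
    (p := fun w : String => w.toList.all (fun ch => allowed.toList.contains ch)) (l := words)
  simp only [decide_not, Bool.decide_eq_true] at hsplit ⊢
  omega
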